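-- pv_equiv track=rewrite | github.com/matthew-li/lbnl_scripts | print_user_group_data.py | get_user_group_pairs
-- ===== SOURCE A (Python) =====
-- import operator
--
-- def get_user_group_pairs(user_data, group_data):
--     """Returns a list of unique pairs of the form (user_id, group_id), sorted first by user_id and
--     then by group_id. The subset of the list relating to a given user is comprised of the user's
--     user_group_id and the group_ids for groups having the user for a member.
--
--     Keyword Arguments:
--     user_data -- user_id --> (user_id, user_username, user_group_id, user_name, user_email)
--     group_data -- group_name --> (group_name, group_id, group_members)
--     """
--     user_group_pairs = set()
--     for user_username in user_data.keys():
--         (user_id, user_username, user_group_id, user_name, user_email) = user_data[user_username]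
--         user_group_pairs.add((user_id, user_group_id))
--         for group_name in group_data.keys():
--             (group_id, group_name, group_members) = group_data[group_name]
--             if user_username in group_members:
--                 user_group_pairs.add((user_id, group_id))
--     return sorted(list(user_group_pairs), key=operator.itemgetter(0, 1))
-- ===== SOURCE B (Python) =====
-- def get_user_group_pairs(user_data, group_data):
--     """Same result as A, but indexes users by username once, then walks each
--     group's member list with dict lookups instead of re-scanning every group's
--     member list for every user."""
--     users = list(user_data.values())
--     ids_by_username = {}
--     for (user_id, user_username, _, _, _) in users:
--         ids_by_username.setdefault(user_username, []).append(user_id)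
--     pairs = {(user_id, user_group_id) for (user_id, _, user_group_id, _, _) in users}
--     for (group_id, _, group_members) in group_data.values():
--         for member in group_members:
--             for user_id in ids_by_username.get(member, []):
--                 pairs.add((user_id, group_id))
--     return sorted(pairs)
-- ===== Notes on version B (the rewrite author's own statement) =====
-- stated objective: faster
-- what changed: Instead of testing every user against every group's member list, B builds a username->user_ids index in one pass and then walks each group's member list once, looking members up in the index.
import Mathlib
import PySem

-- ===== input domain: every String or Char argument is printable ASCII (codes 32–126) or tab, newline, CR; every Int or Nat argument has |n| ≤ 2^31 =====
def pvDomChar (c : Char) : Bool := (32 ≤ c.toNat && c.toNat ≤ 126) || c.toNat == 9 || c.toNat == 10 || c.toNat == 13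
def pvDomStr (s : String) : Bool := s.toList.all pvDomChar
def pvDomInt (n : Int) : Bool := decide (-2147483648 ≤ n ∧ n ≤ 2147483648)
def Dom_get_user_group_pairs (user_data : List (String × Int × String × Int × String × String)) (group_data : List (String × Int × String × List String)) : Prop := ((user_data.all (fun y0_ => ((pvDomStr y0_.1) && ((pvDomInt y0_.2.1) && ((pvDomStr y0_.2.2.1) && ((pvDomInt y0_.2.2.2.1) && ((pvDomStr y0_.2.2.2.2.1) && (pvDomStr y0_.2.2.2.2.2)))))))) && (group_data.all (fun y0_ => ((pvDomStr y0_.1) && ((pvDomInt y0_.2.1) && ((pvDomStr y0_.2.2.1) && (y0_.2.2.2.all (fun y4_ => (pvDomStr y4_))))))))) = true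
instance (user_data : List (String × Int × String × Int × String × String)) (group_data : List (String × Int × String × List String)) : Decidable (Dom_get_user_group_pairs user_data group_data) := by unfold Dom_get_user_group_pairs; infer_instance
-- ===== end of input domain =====

-- B replaces A's user×group nested membership scans by a username → user_ids index built once,
-- then walks each group's member list with index lookups (objective: faster, asymptotically).

-- ===== PORT A =====
-- literal transliteration of A: for each user key, look the user up, add (user_id, user_group_id),
-- then scan every group's member list for the user's username; finally sorted(..., key=itemgetter(0,1)).
def get_user_group_pairs (user_data : List (String × Int × String × Int × String × String)) (group_data : List (String × Int × String × List String)) : List (Int × Int) :=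
  let udict := PySem.Dict.ofList user_data
  let gdict := PySem.Dict.ofList group_data
  let pairs : PySem.Set (Int × Int) :=
    udict.keys.foldl (fun pairs user_username =>
      match udict.get? user_username with
      | none => pairs  -- unreachable: user_username is a key of udict
      | some (user_id, user_username, user_group_id, _user_name, _user_email) =>
        let pairs := PySem.Set.add pairs (user_id, user_group_id)
        gdict.keys.foldl (fun pairs group_name =>
          match gdict.get? group_name with
          | none => pairs  -- unreachable: group_name is a key of gdict
          | some (group_id, _group_name, group_members) =>
            if group_members.contains user_username then
              PySem.Set.add pairs (user_id, group_id)
            else pairs) pairs) PySem.Set.empty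
  PySem.List.sorted2 pairs (fun p => p.1) (fun p => p.2) false

-- ===== PORT B =====
-- transliteration of Source B: index user ids by username, seed the set with (user_id, user_group_id)
-- pairs, then one pass over the groups' member lists with index lookups; sorted(pairs) on int pairs
-- is the lexicographic sort, ported as sorted2 on the two components (PySem's tuple-key form).
def get_user_group_pairs_alt (user_data : List (String × Int × String × Int × String × String)) (group_data : List (String × Int × String × List String)) : List (Int × Int) :=
  let users := (PySem.Dict.ofList user_data).values
  let ids_by_username : PySem.Dict String (List Int) :=
    users.foldl (fun d u => d.modify u.2.1 [] (fun l => l ++ [u.1])) PySem.Dict.empty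
  let pairs : PySem.Set (Int × Int) := PySem.Set.ofList (users.map (fun u => (u.1, u.2.2.1)))
  let pairs :=
    (PySem.Dict.ofList group_data).values.foldl (fun pairs g =>
      g.2.2.foldl (fun pairs member =>
        (ids_by_username.getD member []).foldl (fun pairs user_id =>
          PySem.Set.add pairs (user_id, g.1)) pairs) pairs) pairs
  PySem.List.sorted2 pairs (fun p => p.1) (fun p => p.2) false

-- ===== PRECONDITION & SPEC =====
def Spec_get_user_group_pairs (user_data : List (String × Int × String × Int × String × String)) (group_data : List (String × Int × String × List String)) (out : List (Int × Int)) : Prop := out = get_user_group_pairs_alt user_data group_data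
instance (user_data : List (String × Int × String × Int × String × String)) (group_data : List (String × Int × String × List String)) (out : List (Int × Int)) : Decidable (Spec_get_user_group_pairs user_data group_data out) := by unfold Spec_get_user_group_pairs; infer_instance

-- ===== CLAIM (what is proved, stated in full; the proofs are below) =====
def Claim_equal_get_user_group_pairs : Prop := ∀ (user_data : List (String × Int × String × Int × String × String)) (group_data : List (String × Int × String × List String)), Dom_get_user_group_pairs user_data group_data → Spec_get_user_group_pairs user_data group_data (get_user_group_pairs user_data group_data)

-- ===== LEMMAS AND PROOFS =====

-- generic fold lemmas
theorem pv_mem_foldl_iff {α β : Type} (step : List α → β → List α) (Q : β → α → Prop)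
    (h : ∀ s k x, x ∈ step s k ↔ x ∈ s ∨ Q k x) (l : List β) :
    ∀ (s : List α) (x : α), x ∈ l.foldl step s ↔ x ∈ s ∨ ∃ k ∈ l, Q k x := by
  induction l with
  | nil => simp
  | cons b t ih =>
    intro s x
    rw [List.foldl_cons, ih, h]
    simp only [List.mem_cons]
    constructor
    · rintro ((hx | hq) | ⟨k, hk, hq⟩)
      · exact Or.inl hx
      · exact Or.inr ⟨b, Or.inl rfl, hq⟩
      · exact Or.inr ⟨k, Or.inr hk, hq⟩
    · rintro (hx | ⟨k, rfl | hk, hq⟩)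
      · exact Or.inl (Or.inl hx)
      · exact Or.inl (Or.inr hq)
      · exact Or.inr ⟨k, hk, hq⟩

theorem pv_nodup_foldl {α β : Type} (step : List α → β → List α)
    (h : ∀ s k, s.Nodup → (step s k).Nodup) (l : List β) :
    ∀ s, s.Nodup → (l.foldl step s).Nodup := by
  induction l with
  | nil => intro s hs; simpa using hs
  | cons b t ih => intro s hs; exact ih _ (h s b hs)

-- the set both programs accumulate, as a predicate
def pvSpecSet (user_data : List (String × Int × String × Int × String × String)) (group_data : List (String × Int × String × List String)) (x : Int × Int) : Prop :=
  ∃ u ∈ (PySem.Dict.ofList user_data).values,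
    x = (u.1, u.2.2.1) ∨ ∃ g ∈ (PySem.Dict.ofList group_data).values, u.2.1 ∈ g.2.2 ∧ x = (u.1, g.1)

-- proof-side names for the two accumulated sets (definitionally the ports' folds)
def pvSetA (user_data : List (String × Int × String × Int × String × String)) (group_data : List (String × Int × String × List String)) : List (Int × Int) :=
  (PySem.Dict.ofList user_data).keys.foldl (fun pairs user_username =>
    match (PySem.Dict.ofList user_data).get? user_username with
    | none => pairs
    | some (user_id, uname, user_group_id, _, _) =>
      (PySem.Dict.ofList group_data).keys.foldl (fun pairs group_name =>
        match (PySem.Dict.ofList group_data).get? group_name with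
        | none => pairs
        | some (group_id, _, group_members) =>
          if group_members.contains uname then
            PySem.Set.add pairs (user_id, group_id)
          else pairs) (PySem.Set.add pairs (user_id, user_group_id))) PySem.Set.empty

def pvIdx (user_data : List (String × Int × String × Int × String × String)) : PySem.Dict String (List Int) :=
  (PySem.Dict.ofList user_data).values.foldl (fun d u => d.modify u.2.1 [] (fun l => l ++ [u.1])) PySem.Dict.empty

def pvSetB (user_data : List (String × Int × String × Int × String × String)) (group_data : List (String × Int × String × List String)) : List (Int × Int) :=
  (PySem.Dict.ofList group_data).values.foldl (fun pairs g =>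
    g.2.2.foldl (fun pairs member =>
      ((pvIdx user_data).getD member []).foldl (fun pairs user_id =>
        PySem.Set.add pairs (user_id, g.1)) pairs) pairs)
    (PySem.Set.ofList (((PySem.Dict.ofList user_data).values).map (fun u => (u.1, u.2.2.1))))

theorem pv_portA_eq (user_data : List (String × Int × String × Int × String × String)) (group_data : List (String × Int × String × List String)) :
    get_user_group_pairs user_data group_data
      = PySem.List.sorted2 (pvSetA user_data group_data) (fun p => p.1) (fun p => p.2) false := rfl

theorem pv_portB_eq (user_data : List (String × Int × String × Int × String × String)) (group_data : List (String × Int × String × List String)) :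
    get_user_group_pairs_alt user_data group_data
      = PySem.List.sorted2 (pvSetB user_data group_data) (fun p => p.1) (fun p => p.2) false := rfl

-- the index maps a username to exactly the ids of the users carrying it
theorem pv_mem_idx (user_data : List (String × Int × String × Int × String × String)) (m : String) (uid : Int) :
    uid ∈ (pvIdx user_data).getD m []
      ↔ ∃ u ∈ (PySem.Dict.ofList user_data).values, u.2.1 = m ∧ uid = u.1 := by
  unfold pvIdx
  rw [show ((PySem.Dict.ofList user_data).values.foldl (fun d u => d.modify u.2.1 [] (fun l => l ++ [u.1])) PySem.Dict.empty)
        = (((PySem.Dict.ofList user_data).values.map (fun u => (u.2.1, u.1))).foldl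
            (fun d p => d.modify p.1 [] (fun l => l ++ [p.2])) PySem.Dict.empty) from
      (List.foldl_map (f := fun u : Int × String × Int × String × String => (u.2.1, u.1))
        (g := fun (d : PySem.Dict String (List Int)) (p : String × Int) => d.modify p.1 [] (fun l => l ++ [p.2]))
        (l := (PySem.Dict.ofList user_data).values) (init := PySem.Dict.empty)).symm]
  rw [PySem.Dict.getD_foldl_modify_append]
  simp [PySem.Dict.getD_empty, List.mem_filter, List.mem_map, beq_iff_eq]

-- membership in A's accumulated set
theorem pv_mem_setA (user_data : List (String × Int × String × Int × String × String)) (group_data : List (String × Int × String × List String)) (x : Int × Int) :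
    x ∈ pvSetA user_data group_data ↔ pvSpecSet user_data group_data x := by
  unfold pvSetA pvSpecSet
  rw [pv_mem_foldl_iff _
      (fun k x => ∃ v, (PySem.Dict.ofList user_data).get? k = some v ∧
        (x = (v.1, v.2.2.1) ∨ ∃ gk ∈ (PySem.Dict.ofList group_data).keys,
          ∃ g, (PySem.Dict.ofList group_data).get? gk = some g ∧ v.2.1 ∈ g.2.2 ∧ x = (v.1, g.1)))]
  · simp only [PySem.Set.empty, List.not_mem_nil, false_or]
    constructor
    · rintro ⟨k, hk, v, hv, hx⟩
      refine ⟨v, ?_, ?_⟩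
      · rcases (PySem.Dict.get?_eq_some_iff_mem_items _ _ _ (PySem.Dict.nodup_keys_ofList _)).1 hv with hm
        exact List.mem_map.2 ⟨(k, v), hm, rfl⟩
      · rcases hx with hx | ⟨gk, _, g, hg, hmem, hx⟩
        · exact Or.inl hx
        · refine Or.inr ⟨g, ?_, hmem, hx⟩
          rcases (PySem.Dict.get?_eq_some_iff_mem_items _ _ _ (PySem.Dict.nodup_keys_ofList _)).1 hg with hm
          exact List.mem_map.2 ⟨(gk, g), hm, rfl⟩
    · rintro ⟨v, hv, hx⟩
      rcases List.mem_map.1 hv with ⟨⟨k, v'⟩, hkv, hv'⟩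
      cases hv'
      refine ⟨k, PySem.Dict.mem_keys_of_mem_items _ hkv,
        v', PySem.Dict.get?_of_mem_items _ hkv (PySem.Dict.nodup_keys_ofList _), ?_⟩
      rcases hx with hx | ⟨g, hg, hmem, hx⟩
      · exact Or.inl hx
      · rcases List.mem_map.1 hg with ⟨⟨gk, g'⟩, hgkv, hg'⟩
        cases hg'
        exact Or.inr ⟨gk, PySem.Dict.mem_keys_of_mem_items _ hgkv,
          g', PySem.Dict.get?_of_mem_items _ hgkv (PySem.Dict.nodup_keys_ofList _), hmem, hx⟩
  · intro s k x
    cases (PySem.Dict.ofList user_data).get? k with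
    | none => simp
    | some v =>
      obtain ⟨uid, uname, ugid, unm, uem⟩ := v
      simp only
      rw [pv_mem_foldl_iff _
          (fun gk x => ∃ g, (PySem.Dict.ofList group_data).get? gk = some g ∧
            uname ∈ g.2.2 ∧ x = (uid, g.1))]
      · rw [PySem.Set.mem_add]
        simp only [Option.some.injEq, exists_eq_left']
        tauto
      · intro s' gk y
        cases hg : (PySem.Dict.ofList group_data).get? gk with
        | none => simp
        | some g =>
          obtain ⟨gid, gnm, gmem⟩ := g
          simp only
          split
          · next hc =>
            rw [PySem.Set.mem_add]
            simp only [List.contains_iff_mem] at hc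
            simp [hc]
          · next hc =>
            simp only [List.contains_iff_mem] at hc
            simp [hc]

-- membership in B's accumulated set
theorem pv_mem_setB (user_data : List (String × Int × String × Int × String × String)) (group_data : List (String × Int × String × List String)) (x : Int × Int) :
    x ∈ pvSetB user_data group_data ↔ pvSpecSet user_data group_data x := by
  unfold pvSetB pvSpecSet
  rw [pv_mem_foldl_iff _
      (fun g x => ∃ m ∈ g.2.2, ∃ uid ∈ (pvIdx user_data).getD m [], x = (uid, g.1))]
  · rw [PySem.Set.mem_ofList]
    constructor
    · rintro (hx | ⟨g, hg, m, hm, uid, hid, rfl⟩)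
      · rcases List.mem_map.1 hx with ⟨u, hu, hx⟩
        exact ⟨u, hu, Or.inl hx.symm⟩
      · rcases (pv_mem_idx _ _ _).1 hid with ⟨u, hu, hunm, rfl⟩
        exact ⟨u, hu, Or.inr ⟨g, hg, hunm ▸ hm, rfl⟩⟩
    · rintro ⟨u, hu, hx | ⟨g, hg, hmem, rfl⟩⟩
      · exact Or.inl (List.mem_map.2 ⟨u, hu, hx.symm⟩)
      · exact Or.inr ⟨g, hg, u.2.1, hmem, u.1,
          (pv_mem_idx _ _ _).2 ⟨u, hu, rfl, rfl⟩, rfl⟩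
  · intro s g x
    rw [pv_mem_foldl_iff _
        (fun m x => ∃ uid ∈ (pvIdx user_data).getD m [], x = (uid, g.1))]
    intro s' m y
    rw [pv_mem_foldl_iff _ (fun uid y => y = (uid, g.1))]
    intro s'' uid z
    rw [PySem.Set.mem_add]

-- both accumulated sets are duplicate-free
theorem pv_nodup_setA (user_data : List (String × Int × String × Int × String × String)) (group_data : List (String × Int × String × List String)) :
    (pvSetA user_data group_data).Nodup := by
  unfold pvSetA
  refine pv_nodup_foldl _ ?_ _ _ (List.nodup_nil)
  intro s k hs
  cases hv : (PySem.Dict.ofList user_data).get? k with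
  | none => simpa [hv] using hs
  | some v =>
    obtain ⟨uid, uname, ugid, unm, uem⟩ := v
    simp only
    refine pv_nodup_foldl _ ?_ _ _ (PySem.Set.nodup_add _ _ hs)
    intro s' gk hs'
    cases hg : (PySem.Dict.ofList group_data).get? gk with
    | none => simpa [hg] using hs'
    | some g =>
      obtain ⟨gid, gnm, gmem⟩ := g
      simp only
      split
      · exact PySem.Set.nodup_add _ _ hs'
      · exact hs'

theorem pv_nodup_setB (user_data : List (String × Int × String × Int × String × String)) (group_data : List (String × Int × String × List String)) :
    (pvSetB user_data group_data).Nodup := by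
  unfold pvSetB
  refine pv_nodup_foldl _ ?_ _ _ (PySem.Set.nodup_ofList _)
  intro s g hs
  refine pv_nodup_foldl _ ?_ _ _ hs
  intro s' m hs'
  refine pv_nodup_foldl _ ?_ _ _ hs'
  intro s'' uid hs''
  exact PySem.Set.nodup_add _ _ hs''

-- sorted2 on int pairs is sorted with the lexicographic key
theorem pv_sorted2_eq_sorted_lex (xs : List (Int × Int)) :
    PySem.List.sorted2 xs (fun p => p.1) (fun p => p.2) false
      = PySem.List.sorted xs (fun p => toLex (p.1, p.2)) false := by
  show List.foldl (fun acc x => PySem.List.insertBy _ x acc) [] xs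
      = List.foldl (fun acc x => PySem.List.insertBy _ x acc) [] xs
  congr 1
  funext acc x
  congr 1
  funext a b
  show (decide (a.1 < b.1) || (!decide (b.1 < a.1) && decide (a.2 < b.2)))
      = decide (toLex (a.1, a.2) < toLex (b.1, b.2))
  rcases lt_trichotomy a.1 b.1 with h | h | h
  · simp [Prod.Lex.lt_iff, h, lt_asymm h]
  · simp [Prod.Lex.lt_iff, h]
  · simp [Prod.Lex.lt_iff, h, lt_asymm h, h.ne']

theorem pv_lex_injective : Function.Injective (fun p : Int × Int => toLex (p.1, p.2)) := by
  intro p q h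
  have := toLex.injective h
  exact Prod.ext_iff.2 ⟨congrArg Prod.fst this, congrArg Prod.snd this⟩

-- ===== VERDICT (by name: the statement is the Claim_ definition above) =====
theorem get_user_group_pairs_spec : Claim_equal_get_user_group_pairs := by
  intro user_data group_data _
  unfold Spec_get_user_group_pairs
  rw [pv_portA_eq, pv_portB_eq, pv_sorted2_eq_sorted_lex, pv_sorted2_eq_sorted_lex]
  refine PySem.List.sorted_eq_sorted_of_perm _ _ _ pv_lex_injective ?_
  rw [List.perm_ext_iff_of_nodup (pv_nodup_setA _ _) (pv_nodup_setB _ _)]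
  intro x
  rw [pv_mem_setA, pv_mem_setB]
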